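-- pv_equiv track=rewrite | github.com/Ibrahaha/GoogleHashCode_2017 | polyhash/polyhutils.py | carre
-- ===== SOURCE A (Python) =====
-- def carre(L,pos,rad) :
--     """Fonction qui renvoie la sélection (liste de liste) d'un carré de
--     au sein d'une liste de listes (map).
--     Args :
--         L [] : liste à traiter.
--         pos entier: centre du carré à renvoyer.
--         rad entier: le carré à une demi-longueur (rad + 0.5).
--     Return :
--         Une liste de listes contenant les éléments désirés.
--     """
--     Carre = []
--     h=len(L)
--     w=len(L[0])
--     debX = pos[0]-rad if pos[0]-rad <0 else 0
--     debY = pos[1]-rad if pos[1]-rad <0 else 0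
--     for y in range(-rad-debY,rad+1) :
--         if h>pos[1]+y>=0 :
--             Carre.append([])
--             for x in range(-rad-debX,rad+1) :
--                 if w>pos[0]+x>=0 :
--                     Carre[y+rad+debY].append(L[pos[1]+y][pos[0]+x])
--
--     return Carre,(pos[0]-rad-debX,pos[1]-rad-debY)
-- ===== SOURCE B (Python) =====
-- def carre(L, pos, rad):
--     rs = max(0, pos[1] - rad)
--     re = min(len(L), max(0, pos[1] + rad + 1))
--     cs = max(0, pos[0] - rad)
--     ce = min(len(L[0]), max(0, pos[0] + rad + 1))
--     return [row[cs:ce] for row in L[rs:re]], (cs, rs)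
-- ===== Notes on version B (the rewrite author's own statement) =====
-- stated objective: simpler
-- what changed: A walks two nested index loops with per-element boundary guards and appends into Carre[y+rad+debY]; B computes the clamped window rectangle (rs,re,cs,ce) once and returns it by row slicing in a single comprehension.
import Mathlib
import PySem

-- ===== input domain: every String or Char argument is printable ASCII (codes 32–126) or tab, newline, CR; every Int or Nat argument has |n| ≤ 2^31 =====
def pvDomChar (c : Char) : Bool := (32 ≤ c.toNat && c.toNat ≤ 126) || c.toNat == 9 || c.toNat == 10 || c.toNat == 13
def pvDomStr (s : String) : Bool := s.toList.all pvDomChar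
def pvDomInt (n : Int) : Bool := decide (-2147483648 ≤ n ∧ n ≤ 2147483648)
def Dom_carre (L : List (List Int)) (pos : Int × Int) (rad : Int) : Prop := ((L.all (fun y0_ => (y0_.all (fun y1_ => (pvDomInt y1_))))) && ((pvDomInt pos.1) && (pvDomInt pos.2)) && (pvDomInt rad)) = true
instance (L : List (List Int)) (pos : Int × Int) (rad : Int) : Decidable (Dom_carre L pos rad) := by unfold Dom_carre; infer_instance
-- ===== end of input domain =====

-- B replaces A's nested loops with per-element boundary checks by computing the clamped window
-- bounds once and slicing (objective: simpler; return value only — neither program mutates L).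

-- ===== PORT A =====
-- Python 'Carre[i].append(v)': exact for 0 ≤ i < C.length, the only indices reached on admitted inputs
def pvAppendAt (C : List (List Int)) (i : Int) (v : Int) : List (List Int) :=
  C.modify i.toNat (fun row => row ++ [v])

def carre (L : List (List Int)) (pos : Int × Int) (rad : Int) : List (List Int) × (Int × Int) :=
  let h : Int := L.length
  let w : Int := (((PySem.List.pyGet? L 0).getD []).length : Int)
  let debX : Int := if pos.1 - rad < 0 then pos.1 - rad else 0
  let debY : Int := if pos.2 - rad < 0 then pos.2 - rad else 0
  let Carre : List (List Int) :=
    (PySem.List.pyRange (-rad - debY) (rad + 1) 1).foldl (fun C y =>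
      if h > pos.2 + y ∧ pos.2 + y ≥ 0 then
        (PySem.List.pyRange (-rad - debX) (rad + 1) 1).foldl (fun C2 x =>
          if w > pos.1 + x ∧ pos.1 + x ≥ 0 then
            pvAppendAt C2 (y + rad + debY)
              (PySem.List.pyGetD (PySem.List.pyGetD L (pos.2 + y) []) (pos.1 + x) 0)
          else C2) (C ++ [[]])
      else C) []
  (Carre, (pos.1 - rad - debX, pos.2 - rad - debY))

-- ===== PORT B =====
def carre_alt (L : List (List Int)) (pos : Int × Int) (rad : Int) : List (List Int) × (Int × Int) :=
  let rs : Int := max 0 (pos.2 - rad)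
  let re : Int := min (L.length : Int) (max 0 (pos.2 + rad + 1))
  let cs : Int := max 0 (pos.1 - rad)
  let ce : Int := min ((((PySem.List.pyGet? L 0).getD []).length : Int)) (max 0 (pos.1 + rad + 1))
  ((PySem.List.slice L (some rs) (some re)).map (fun row => PySem.List.slice row (some cs) (some ce)),
   (cs, rs))

-- ===== PRECONDITION & SPEC =====
-- Pre_ excludes exactly the inputs on which A raises IndexError: L = [] (len(L[0])), and ragged
-- lists having a window row shorter than the clamped column bound (L[r][c] out of range).
def Pre_carre (L : List (List Int)) (pos : Int × Int) (rad : Int) : Prop :=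
  L ≠ [] ∧
  (∀ i : Nat, i < L.length →
    max 0 (pos.2 - rad) ≤ (i : Int) → (i : Int) < min (L.length : Int) (pos.2 + rad + 1) →
    max 0 (pos.1 - rad) < min ((L.headD []).length : Int) (pos.1 + rad + 1) →
    min ((L.headD []).length : Int) (pos.1 + rad + 1) ≤ ((L.getD i []).length : Int))
instance (L : List (List Int)) (pos : Int × Int) (rad : Int) : Decidable (Pre_carre L pos rad) := by
  unfold Pre_carre; infer_instance

def pvWitness_carre : List (List Int) × (Int × Int) × Int := ([[1, 2], [3, 4]], ((0, 0), 1))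

def Spec_carre (L : List (List Int)) (pos : Int × Int) (rad : Int) (out : List (List Int) × (Int × Int)) : Prop := out = carre_alt L pos rad
instance (L : List (List Int)) (pos : Int × Int) (rad : Int) (out : List (List Int) × (Int × Int)) : Decidable (Spec_carre L pos rad out) := by unfold Spec_carre; infer_instance

-- ===== CLAIM (what is proved, stated in full; the proofs are below) =====
def Claim_equal_carre : Prop := ∀ (L : List (List Int)) (pos : Int × Int) (rad : Int), Dom_carre L pos rad → Pre_carre L pos rad → Spec_carre L pos rad (carre L pos rad)

-- ===== LEMMAS AND PROOFS =====

theorem pvAppendAt_last (C0 : List (List Int)) (r : List Int) (i : Int)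
    (hi : i = (C0.length : Int)) (v : Int) :
    pvAppendAt (C0 ++ [r]) i v = C0 ++ [r ++ [v]] := by
  subst hi
  unfold pvAppendAt
  simp only [Int.toNat_natCast]
  induction C0 with
  | nil => simp
  | cons c t ih => simpa using ih
theorem pv_foldAt (cols : List Int) (P : Int → Prop) [DecidablePred P] (f : Int → Int) :
    ∀ (C0 : List (List Int)) (r : List Int) (i : Int), i = (C0.length : Int) →
      cols.foldl (fun C x => if P x then pvAppendAt C i (f x) else C) (C0 ++ [r])
        = C0 ++ [cols.foldl (fun row x => if P x then row ++ [f x] else row) r] := by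
  induction cols with
  | nil => intro C0 r i hi; rfl
  | cons x cols ih =>
    intro C0 r i hi
    by_cases hP : P x
    · simp only [List.foldl_cons, if_pos hP, pvAppendAt_last C0 r i hi]
      exact ih C0 (r ++ [f x]) i hi
    · simp only [List.foldl_cons, if_neg hP]
      exact ih C0 r i hi

theorem pv_outer_build (cols : Int → List Int) (P : Int → Prop) [DecidablePred P]
    (f : Int → Int → Int) (off : Int) :
    ∀ (n : Nat) (a : Int) (C0 : List (List Int)), a + off = (C0.length : Int) →
      (PySem.List.pyRange a (a + n) 1).foldl
        (fun C y => (cols y).foldl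
          (fun C2 x => if P x then pvAppendAt C2 (y + off) (f y x) else C2) (C ++ [[]])) C0
        = C0 ++ (PySem.List.pyRange a (a + n) 1).map
            (fun y => (cols y).foldl (fun row x => if P x then row ++ [f y x] else row) []) := by
  intro n
  induction n with
  | zero =>
    intro a C0 h
    rw [PySem.List.pyRange_one_eq_nil (by omega)]
    simp
  | succ n ih =>
    intro a C0 h
    rw [PySem.List.pyRange_one_cons (by omega)]
    rw [List.foldl_cons, List.map_cons]
    rw [pv_foldAt (cols a) P (f a) C0 [] (a + off) h]
    have ih' := ih (a + 1) (C0 ++ [(cols a).foldl (fun row x => if P x then row ++ [f a x] else row) []])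
      (by simp; omega)
    rw [show (a + 1) + (n : Int) = a + ((n + 1 : Nat) : Int) by push_cast; ring] at ih'
    rw [ih', List.append_assoc]
    rfl
theorem pv_filter_lt_pyRange (t : Int) :
    ∀ (n : Nat) (a : Int), (PySem.List.pyRange a (a + n) 1).filter (fun y => decide (y < t))
      = PySem.List.pyRange a (min (a + n) t) 1 := by
  intro n
  induction n with
  | zero =>
    intro a
    rw [PySem.List.pyRange_one_eq_nil (by omega), PySem.List.pyRange_one_eq_nil (by omega)]
    rfl
  | succ n ih =>
    intro a
    rw [PySem.List.pyRange_one_cons (by omega)]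
    have ih' := ih (a + 1)
    rw [show (a + 1) + (n : Int) = a + ((n + 1 : Nat) : Int) by push_cast; ring] at ih'
    by_cases ht : a < t
    · rw [List.filter_cons_of_pos (by simpa using ht), ih',
        PySem.List.pyRange_one_cons (show a < min (a + ((n + 1 : Nat) : Int)) t by omega)]
    · rw [List.filter_cons_of_neg (by simpa using ht), ih',
        PySem.List.pyRange_one_eq_nil (by omega), PySem.List.pyRange_one_eq_nil (by omega)]

theorem pv_map_shift {α : Type} (F : Int → α) (s : Int) :
    ∀ (n : Nat) (a : Int), (PySem.List.pyRange a (a + n) 1).map (fun y => F (s + y))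
      = (PySem.List.pyRange (s + a) (s + a + n) 1).map F := by
  intro n a
  rw [PySem.List.pyRange_one, PySem.List.pyRange_one]
  rw [show a + (n : Int) - a = (n : Int) by ring, show s + a + (n : Int) - (s + a) = (n : Int) by ring]
  simp only [Int.toNat_natCast, List.map_map]
  apply List.map_congr_left
  intro k _
  exact congrArg F (by push_cast; ring)

theorem pv_map_getD_eq_slice {α : Type} (R : List α) (d : α) (u v : Int)
    (hu : 0 ≤ u) (hv0 : 0 ≤ v) (hv : u < v → v ≤ (R.length : Int)) :
    (PySem.List.pyRange u v 1).map (fun c => PySem.List.pyGetD R c d)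
      = PySem.List.slice R (some u) (some v) := by
  rw [PySem.List.slice_toNat R hu hv0]
  by_cases huv : u < v
  · have hvlen := hv huv
    apply List.ext_getElem
    · simp [PySem.List.length_pyRange_one]
      omega
    · intro k h1 h2
      have hk : k < (v - u).toNat := by
        simpa [PySem.List.length_pyRange_one] using h1
      rw [List.getElem_map, PySem.List.getElem_pyRange_one, List.getElem_take, List.getElem_drop,
        PySem.List.pyGetD_eq_getElem R d (by omega) (by omega)]
      congr 1
      omega
  · rw [PySem.List.pyRange_one_eq_nil (by omega), List.map_nil]
    rw [show v.toNat - u.toNat = 0 by omega, List.take_zero]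

theorem pv_filter_lt_pyRange' (t a b : Int) :
    (PySem.List.pyRange a b 1).filter (fun y => decide (y < t))
      = PySem.List.pyRange a (min b t) 1 := by
  by_cases hab : a ≤ b
  · rw [show b = a + (((b - a).toNat : Nat) : Int) by omega]
    exact pv_filter_lt_pyRange t (b - a).toNat a
  · rw [PySem.List.pyRange_one_eq_nil (by omega), PySem.List.pyRange_one_eq_nil (by omega)]
    rfl

theorem pv_outer_build' (cols : Int → List Int) (P : Int → Prop) [DecidablePred P]
    (f : Int → Int → Int) (off : Int) (a b : Int) (C0 : List (List Int))
    (hoff : a + off = (C0.length : Int)) :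
      (PySem.List.pyRange a b 1).foldl
        (fun C y => (cols y).foldl
          (fun C2 x => if P x then pvAppendAt C2 (y + off) (f y x) else C2) (C ++ [[]])) C0
        = C0 ++ (PySem.List.pyRange a b 1).map
            (fun y => (cols y).foldl (fun row x => if P x then row ++ [f y x] else row) []) := by
  by_cases hab : a ≤ b
  · rw [show b = a + (((b - a).toNat : Nat) : Int) by omega]
    exact pv_outer_build cols P f off (b - a).toNat a C0 hoff
  · rw [PySem.List.pyRange_one_eq_nil (by omega)]
    simp

theorem pv_map_shift' {α : Type} (F : Int → α) (s a b : Int) :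
    (PySem.List.pyRange a b 1).map (fun y => F (s + y))
      = (PySem.List.pyRange (s + a) (s + b) 1).map F := by
  by_cases hab : a ≤ b
  · rw [show b = a + (((b - a).toNat : Nat) : Int) by omega,
      show s + (a + (((b - a).toNat : Nat) : Int)) = s + a + (((b - a).toNat : Nat) : Int) by ring]
    exact pv_map_shift F s (b - a).toNat a
  · rw [PySem.List.pyRange_one_eq_nil (by omega), PySem.List.pyRange_one_eq_nil (by omega)]
    rfl

theorem pv_slice_nil {α : Type} (R : List α) (u v : Int) (hu : 0 ≤ u) (hv : 0 ≤ v) (hvu : v ≤ u) :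
    PySem.List.slice R (some u) (some v) = [] := by
  rw [PySem.List.slice_toNat R hu hv, show v.toNat - u.toNat = 0 by omega, List.take_zero]

theorem carre_main (L : List (List Int)) (pos : Int × Int) (rad : Int)
    (hpre : Pre_carre L pos rad) : carre L pos rad = carre_alt L pos rad := by
  obtain ⟨hL, hrows⟩ := hpre
  have hhead : (PySem.List.pyGet? L 0).getD [] = L.headD [] := by
    cases L with
    | nil => rfl
    | cons a t => simp
  simp only [carre, carre_alt, hhead]
  -- abbreviations
  have hdX : (if pos.1 - rad < 0 then pos.1 - rad else 0) = pos.1 - rad - max 0 (pos.1 - rad) := by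
    split_ifs <;> omega
  have hdY : (if pos.2 - rad < 0 then pos.2 - rad else 0) = pos.2 - rad - max 0 (pos.2 - rad) := by
    split_ifs <;> omega
  rw [hdX, hdY]
  set h : Int := (L.length : Int) with hh
  set w : Int := ((L.headD []).length : Int) with hw
  set rs : Int := max 0 (pos.2 - rad) with hrs
  set cs : Int := max 0 (pos.1 - rad) with hcs
  set re : Int := min h (max 0 (pos.2 + rad + 1)) with hre
  set ce : Int := min w (max 0 (pos.1 + rad + 1)) with hce
  have h0 : 0 ≤ h := by positivity
  have w0 : 0 ≤ w := by positivity
  have hrs0 : 0 ≤ rs := by omega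
  have hcs0 : 0 ≤ cs := by omega
  rw [show -rad - (pos.2 - rad - rs) = rs - pos.2 by ring,
      show -rad - (pos.1 - rad - cs) = cs - pos.1 by ring,
      show pos.1 - rad - (pos.1 - rad - cs) = cs by ring,
      show pos.2 - rad - (pos.2 - rad - rs) = rs by ring]
  simp only [show ∀ y : Int, y + rad + (pos.2 - rad - rs) = y + (pos.2 - rs) from fun y => by ring]
  simp only [Prod.mk.injEq]
  refine ⟨?_, trivial⟩
  rw [PySem.List.foldl_ite_eq_foldl_filter]
  rw [List.filter_congr (fun y hy => by
    rw [PySem.List.mem_pyRange_one] at hy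
    simp only [decide_eq_decide]
    constructor
    · intro hc; omega
    · intro hc; omega : ∀ y ∈ PySem.List.pyRange (rs - pos.2) (rad + 1) 1,
        (decide (h > pos.2 + y ∧ pos.2 + y ≥ 0)) = decide (y < h - pos.2))]
  rw [pv_filter_lt_pyRange']
  by_cases hB : rs - pos.2 < min (rad + 1) (h - pos.2)
  · -- nonempty window of rows
    have hrow : ∀ y ∈ PySem.List.pyRange (rs - pos.2) (min (rad + 1) (h - pos.2)) 1,
        (PySem.List.pyRange (cs - pos.1) (rad + 1) 1).foldl
          (fun row x => if w > pos.1 + x ∧ pos.1 + x ≥ 0 then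
            row ++ [PySem.List.pyGetD (PySem.List.pyGetD L (pos.2 + y) []) (pos.1 + x) 0]
          else row) []
        = PySem.List.slice (PySem.List.pyGetD L (pos.2 + y) []) (some cs) (some ce) := by
      intro y hy
      rw [PySem.List.mem_pyRange_one] at hy
      rw [PySem.List.foldl_ite_eq_foldl_filter]
      rw [List.filter_congr (fun x hx => by
        rw [PySem.List.mem_pyRange_one] at hx
        simp only [decide_eq_decide]
        constructor
        · intro hc; omega
        · intro hc; omega : ∀ x ∈ PySem.List.pyRange (cs - pos.1) (rad + 1) 1,
            (decide (w > pos.1 + x ∧ pos.1 + x ≥ 0)) = decide (x < w - pos.1))]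
      rw [pv_filter_lt_pyRange', PySem.List.foldl_append_singleton_eq_map, List.nil_append]
      rw [pv_map_shift' (fun c => PySem.List.pyGetD (PySem.List.pyGetD L (pos.2 + y) []) c 0) pos.1]
      rw [show pos.1 + (cs - pos.1) = cs by ring]
      by_cases hcv : cs < pos.1 + min (rad + 1) (w - pos.1)
      · rw [show pos.1 + min (rad + 1) (w - pos.1) = ce by omega]
        apply pv_map_getD_eq_slice _ 0 cs ce hcs0 (by omega)
        intro hlt
        have hy0 : 0 ≤ pos.2 + y := by omega
        have hyh : pos.2 + y < (L.length : Int) := by omega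
        have hRg : PySem.List.pyGetD L (pos.2 + y) [] = L.getD (pos.2 + y).toNat [] := by
          rw [PySem.List.pyGetD_eq_getElem L [] hy0 (by omega), List.getD_eq_getElem L [] (by omega)]
        have hpre := hrows (pos.2 + y).toNat (by omega) (by omega) (by omega) (by omega)
        rw [hRg]
        omega
      · rw [PySem.List.pyRange_one_eq_nil (by omega), List.map_nil,
          pv_slice_nil _ cs ce hcs0 (by omega) (by omega)]
    rw [pv_outer_build' _ _ _ (pos.2 - rs) _ _ [] (by simp)]
    rw [List.nil_append, List.map_congr_left hrow]
    rw [pv_map_shift' (fun i => PySem.List.slice (PySem.List.pyGetD L i []) (some cs) (some ce)) pos.2]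
    rw [show pos.2 + (rs - pos.2) = rs by ring,
        show pos.2 + min (rad + 1) (h - pos.2) = re by omega]
    rw [← pv_map_getD_eq_slice L [] rs re hrs0 (by omega) (fun _ => by omega), List.map_map]
    rfl
  · rw [PySem.List.pyRange_one_eq_nil
        (show min (rad + 1) (h - pos.2) ≤ rs - pos.2 by omega), List.foldl_nil,
      pv_slice_nil L rs re hrs0 (by omega) (by omega), List.map_nil]

-- ===== VERDICT (by name: the statement is the Claim_ definition above) =====
theorem carre_spec : Claim_equal_carre := by
  intro L pos rad _ hpre
  unfold Spec_carre
  exact carre_main L pos rad hpre
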